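-- pv_equiv track=rewrite | github.com/nascimentorm/codewars-challenges | 7kyu/Prison-Break.py | libertar_prisioneiros
-- ===== SOURCE A (Python) =====
-- def libertar_prisioneiros(celas):
--     libertados = 0
--     i = 0
--
--     while i < len(celas):
--         if celas[i]:  # Se a cela está destrancada
--             libertados += 1
--             # Inverter todas as celas
--             celas = [not cela for cela in celas]
--         i += 1
--
--     return libertados
-- ===== SOURCE B (Python) =====
-- def libertar_prisioneiros(celas):
--     libertados = 0
--     flipped = False
--     for cela in celas:
--         if cela != flipped:
--             libertados += 1
--             flipped = not flipped
--     return libertados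
-- ===== Notes on version B (the rewrite author's own statement) =====
-- stated objective: faster
-- what changed: Single left-to-right pass tracking a flip-parity flag instead of rebuilding the whole list on every release.
import Mathlib
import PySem

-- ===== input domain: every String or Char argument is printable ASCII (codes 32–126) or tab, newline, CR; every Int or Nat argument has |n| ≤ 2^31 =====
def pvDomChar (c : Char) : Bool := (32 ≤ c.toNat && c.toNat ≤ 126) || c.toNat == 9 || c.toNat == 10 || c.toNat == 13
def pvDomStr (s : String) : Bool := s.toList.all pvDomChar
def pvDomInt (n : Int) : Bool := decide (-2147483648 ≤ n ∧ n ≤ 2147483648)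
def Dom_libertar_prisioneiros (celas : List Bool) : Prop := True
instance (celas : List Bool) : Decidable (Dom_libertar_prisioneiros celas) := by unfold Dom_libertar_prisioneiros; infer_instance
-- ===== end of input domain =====

-- B replaces A's quadratic rebuild-the-list-on-every-release loop with a single pass carrying a flip-parity flag.

-- ===== PORT A =====
-- while loop of A: index i over celas; on a True cell, count and replace celas by its map (not ·).
def pvALoop (celas : List Bool) (libertados : Int) (i : Nat) : Int :=
  if h : i < celas.length then
    if celas[i] then
      pvALoop (celas.map (fun cela => !cela)) (libertados + 1) (i + 1)
    else
      pvALoop celas libertados (i + 1)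
  else
    libertados
termination_by celas.length - i
decreasing_by
  all_goals (try simp only [List.length_map, List.length_attach]); all_goals omega

def libertar_prisioneiros (celas : List Bool) : Int :=
  pvALoop celas 0 0

-- ===== PORT B =====
-- for-loop of B: accumulator (libertados, flipped) over the list.
def pvBLoop (rest : List Bool) (libertados : Int) (flipped : Bool) : Int :=
  match rest with
  | [] => libertados
  | cela :: rest' =>
    if cela != flipped then
      pvBLoop rest' (libertados + 1) (!flipped)
    else
      pvBLoop rest' libertados flipped

def libertar_prisioneiros_alt (celas : List Bool) : Int :=
  pvBLoop celas 0 false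

-- ===== PRECONDITION & SPEC =====
def Spec_libertar_prisioneiros (celas : List Bool) (out : Int) : Prop := out = libertar_prisioneiros_alt celas
instance (celas : List Bool) (out : Int) : Decidable (Spec_libertar_prisioneiros celas out) := by unfold Spec_libertar_prisioneiros; infer_instance

-- ===== CLAIM (what is proved, stated in full; the proofs are below) =====
def Claim_equal_libertar_prisioneiros : Prop := ∀ (celas : List Bool), Dom_libertar_prisioneiros celas → Spec_libertar_prisioneiros celas (libertar_prisioneiros celas)

-- ===== LEMMAS AND PROOFS =====

-- Flipping the whole remaining list is the same as flipping the parity flag.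
theorem pvBLoop_map_not (rest : List Bool) : ∀ (libertados : Int) (flipped : Bool),
    pvBLoop (rest.map (fun cela => !cela)) libertados flipped = pvBLoop rest libertados (!flipped) := by
  induction rest with
  | nil => intro l f; rfl
  | cons c rest' ih =>
    intro l f
    simp only [List.map_cons, pvBLoop]
    cases c <;> cases f <;> simp [ih]

theorem pvALoop_eq_pvBLoop (d : Nat) : ∀ (celas : List Bool) (i : Nat) (libertados : Int),
    celas.length - i = d →
    pvALoop celas libertados i = pvBLoop (celas.drop i) libertados false := by
  induction d with
  | zero =>
    intro celas i l hd
    have hge : celas.length ≤ i := by omega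
    rw [pvALoop, dif_neg (by omega)]
    rw [List.drop_eq_nil_of_le hge]
    rfl
  | succ d ih =>
    intro celas i l hd
    have hlt : i < celas.length := by omega
    have hdrop : celas.drop i = celas[i] :: celas.drop (i + 1) :=
      List.drop_eq_getElem_cons hlt
    rw [pvALoop, dif_pos hlt]
    by_cases hc : celas[i] = true
    · rw [if_pos hc]
      have := ih (celas.map (fun cela => !cela)) (i + 1) (l + 1)
        (by simp only [List.length_map]; omega)
      rw [this, ← List.map_drop, pvBLoop_map_not]
      rw [hdrop, pvBLoop, hc]
      simp
    · simp only [Bool.not_eq_true] at hc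
      rw [if_neg (by simp [hc])]
      rw [ih celas (i + 1) l (by omega)]
      rw [hdrop, pvBLoop, hc]
      simp

-- ===== VERDICT (by name: the statement is the Claim_ definition above) =====
theorem libertar_prisioneiros_spec : Claim_equal_libertar_prisioneiros := by
  intro celas _
  unfold Spec_libertar_prisioneiros libertar_prisioneiros libertar_prisioneiros_alt
  simpa using pvALoop_eq_pvBLoop celas.length celas 0 0 (by omega)
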